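-- pv_equiv track=rewrite | github.com/Lu4katA777/HashCrack-tool | Hashcrack.py | random_case_variants
-- ===== SOURCE A (Python) =====
-- import itertools
--
-- def random_case_variants(word, limit=200):
--     results = set()
--     combos = itertools.product(*[(c.lower(), c.upper()) for c in word])
--
--     for i, combo in enumerate(combos):
--         if i > limit:
--             break
--         results.add("".join(combo))
--
--     return results
-- ===== SOURCE B (Python) =====
-- def random_case_variants(word, limit=200):
--     # Index-based: variant i has char p uppercased iff bit (n-1-p) of i is set.
--     n = len(word)
--     stop = min(limit, (1 << n) - 1)
--     if stop < 0:
--         return set()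
--     results = set()
--     for i in range(stop + 1):
--         chars = [word[p].upper() if (i >> (n - 1 - p)) & 1 else word[p].lower()
--                  for p in range(n)]
--         results.add("".join(chars))
--     return results
-- ===== Notes on version B (the rewrite author's own statement) =====
-- stated objective: alternative
-- what changed: B computes each case variant directly from its integer index (bit n-1-p of i selects upper/lower for position p) over range(min(limit, 2**n-1)+1), instead of enumerating itertools.product tuples and breaking at the limit.
import Mathlib
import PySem

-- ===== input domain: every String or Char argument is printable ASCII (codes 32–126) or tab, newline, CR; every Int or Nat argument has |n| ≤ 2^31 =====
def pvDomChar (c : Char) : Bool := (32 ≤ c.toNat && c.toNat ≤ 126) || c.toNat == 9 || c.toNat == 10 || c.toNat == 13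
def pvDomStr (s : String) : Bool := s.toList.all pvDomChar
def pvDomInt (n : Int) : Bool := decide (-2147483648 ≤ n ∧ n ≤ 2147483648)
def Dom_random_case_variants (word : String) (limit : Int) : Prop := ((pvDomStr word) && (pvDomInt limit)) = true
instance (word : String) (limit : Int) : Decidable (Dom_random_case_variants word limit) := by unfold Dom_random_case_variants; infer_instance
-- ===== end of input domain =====

-- B computes each case variant from its integer index (bit p set = uppercase) instead of
-- materialising itertools.product; same returned set (insertion order equal), alternative decomposition.
-- ===== PORT A =====
-- itertools.product(*lists): first factor varies slowest
def pvProd : List (List Char) → List (List Char)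
  | [] => [[]]
  | xs :: rest => xs.flatMap (fun a => (pvProd rest).map (fun t => a :: t))

-- 'for i, combo in enumerate(combos): if i > limit: break; results.add("".join(combo))'
def pvLoopA (limit : Int) : List (List Char) → Int → PySem.Set String → PySem.Set String
  | [], _, res => res
  | combo :: rest, i, res =>
      if i > limit then res
      else pvLoopA limit rest (i + 1) (PySem.Set.add res (String.mk combo))

def random_case_variants (word : String) (limit : Int) : List String :=
  let combos := pvProd (word.toList.map (fun c => [PySem.Chars.lowerChar c, PySem.Chars.upperChar c]))
  pvLoopA limit combos 0 PySem.Set.empty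

-- ===== PORT B =====
-- chars = [word[p].upper() if (i >> (n-1-p)) & 1 else word[p].lower() for p in range(n)]
-- (word[p] is ported as getD with an unreachable default: p < n always holds)
def pvBuild (wl : List Char) (n : Nat) (i : Nat) : List Char :=
  (List.range n).map (fun p =>
    if (i >>> (n - 1 - p)) &&& 1 = 1 then PySem.Chars.upperChar (wl.getD p ' ')
    else PySem.Chars.lowerChar (wl.getD p ' '))

def random_case_variants_alt (word : String) (limit : Int) : List String :=
  let wl := word.toList
  let n := wl.length
  let stop : Int := min limit ((2 : Int) ^ n - 1)
  if stop < 0 then PySem.Set.empty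
  else (List.range (stop.toNat + 1)).foldl
      (fun res i => PySem.Set.add res (String.mk (pvBuild wl n i))) PySem.Set.empty

-- ===== PRECONDITION & SPEC =====
def Spec_random_case_variants (word : String) (limit : Int) (out : List String) : Prop := out = random_case_variants_alt word limit
instance (word : String) (limit : Int) (out : List String) : Decidable (Spec_random_case_variants word limit out) := by unfold Spec_random_case_variants; infer_instance

-- ===== CLAIM (what is proved, stated in full; the proofs are below) =====
def Claim_equal_random_case_variants : Prop := ∀ (word : String) (limit : Int), Dom_random_case_variants word limit → Spec_random_case_variants word limit (random_case_variants word limit)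

-- ===== LEMMAS AND PROOFS =====



-- helper used only by the proofs: the i-th product combo is the bit-decoded variant
def pvDec (wl : List Char) (i : Nat) : List Char := pvBuild wl wl.length i

theorem pvProd_length (wl : List Char) :
    (pvProd (wl.map (fun c => [PySem.Chars.lowerChar c, PySem.Chars.upperChar c]))).length
      = 2 ^ wl.length := by
  induction wl with
  | nil => simp [pvProd]
  | cons c cs ih =>
      simp [pvProd, List.flatMap_cons, ih, pow_succ]
      ring

theorem pvBit_eq (k m r : Nat) (hk : k < m) :
    ((2 ^ m + r) >>> k) &&& 1 = (r >>> k) &&& 1 := by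
  have h2 : (2 : Nat) ^ m = 2 ^ (m - k) * 2 ^ k := by
    rw [← pow_add]; congr 1; omega
  have h3 : (2 : Nat) ^ (m - k) = 2 * 2 ^ (m - k - 1) := by
    rw [← pow_succ']; congr 1; omega
  rw [Nat.and_one_is_mod, Nat.and_one_is_mod, Nat.shiftRight_eq_div_pow,
    Nat.shiftRight_eq_div_pow, h2, mul_comm, Nat.mul_add_div (by positivity), h3]
  omega

theorem pvProd_get (wl : List Char) (i : Nat) (hi : i < 2 ^ wl.length) :
    (pvProd (wl.map (fun c => [PySem.Chars.lowerChar c, PySem.Chars.upperChar c])))[i]?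
      = some (pvDec wl i) := by
  induction wl generalizing i with
  | nil =>
      have h0 : i = 0 := by simpa using hi
      subst h0
      simp [pvProd, pvDec, pvBuild]
  | cons c cs ih =>
      have hm := pvProd_length cs
      set m := cs.length with hmdef
      have hsplit : pvProd ((c :: cs).map (fun c => [PySem.Chars.lowerChar c, PySem.Chars.upperChar c]))
          = (pvProd (cs.map (fun c => [PySem.Chars.lowerChar c, PySem.Chars.upperChar c]))).map
              (fun t => PySem.Chars.lowerChar c :: t)
            ++ (pvProd (cs.map (fun c => [PySem.Chars.lowerChar c, PySem.Chars.upperChar c]))).map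
              (fun t => PySem.Chars.upperChar c :: t) := by
        simp [pvProd, List.flatMap_cons]
      have hdec : ∀ j : Nat, pvDec (c :: cs) j
          = (if (j >>> m) &&& 1 = 1 then PySem.Chars.upperChar c else PySem.Chars.lowerChar c)
            :: (List.range m).map (fun p =>
                if (j >>> (m - 1 - p)) &&& 1 = 1 then PySem.Chars.upperChar (cs.getD p ' ')
                else PySem.Chars.lowerChar (cs.getD p ' ')) := by
        intro j
        simp only [pvDec, pvBuild, List.length_cons, List.range_succ_eq_map, List.map_cons,
          List.map_map]
        congr 1
        apply List.map_congr_left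
        intro p hp
        simp only [Function.comp_apply, Nat.succ_eq_add_one]
        have he : cs.length - (p + 1) = m - 1 - p := by omega
        simp [he]
      have hdec' : ∀ j : Nat, pvDec cs j
          = (List.range m).map (fun p =>
                if (j >>> (m - 1 - p)) &&& 1 = 1 then PySem.Chars.upperChar (cs.getD p ' ')
                else PySem.Chars.lowerChar (cs.getD p ' ')) := by
        intro j; rfl
      rw [hsplit]
      by_cases hlt : i < 2 ^ m
      · have h0 : i >>> m = 0 := by
          rw [Nat.shiftRight_eq_div_pow]; exact Nat.div_eq_of_lt hlt
        rw [List.getElem?_append_left (by simpa [hm] using hlt), List.getElem?_map, ih i hlt,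
          hdec i, h0]
        simp [hdec']
      · have hge : 2 ^ m ≤ i := by omega
        have hi2 : i < 2 ^ (m + 1) := by simpa using hi
        set r := i - 2 ^ m with hrdef
        have hr : r < 2 ^ m := by
          have : (2 : Nat) ^ (m + 1) = 2 ^ m + 2 ^ m := by ring
          omega
        have h1 : i >>> m = 1 := by
          rw [Nat.shiftRight_eq_div_pow]
          refine Nat.div_eq_of_lt_le (by simpa using hge) ?_
          have : (1 + 1) * 2 ^ m = 2 ^ (m + 1) := by ring
          omega
        rw [List.getElem?_append_right (by simpa [hm] using hge)]
        simp only [List.length_map, hm]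
        rw [List.getElem?_map, ih r hr, hdec i, h1]
        have hir : i = 2 ^ m + r := by omega
        simp only [Option.map_some, Option.some.injEq, hdec']
        congr 1
        apply List.map_congr_left
        intro p hp
        have hpm : p < m := List.mem_range.mp hp
        have hb := pvBit_eq (m - 1 - p) m r (by omega)
        rw [← hir] at hb
        rw [← hb]

theorem pvLoopA_eq (limit : Int) (cs : List (List Char)) (i : Int) (res : PySem.Set String) :
    pvLoopA limit cs i res
      = ((cs.take (limit + 1 - i).toNat).map String.mk).foldl PySem.Set.add res := by
  induction cs generalizing i res with
  | nil => simp [pvLoopA]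
  | cons c rest ih =>
      by_cases h : i > limit
      · have : (limit + 1 - i).toNat = 0 := by omega
        simp [pvLoopA, h, this]
      · have h1 : (limit + 1 - i).toNat = (limit + 1 - (i + 1)).toNat + 1 := by omega
        simp only [pvLoopA, if_neg h, ih, h1, List.take_succ_cons, List.map_cons,
          List.foldl_cons]

theorem pvTake_eq (wl : List Char) (limit : Int) (hpos : ¬ min limit ((2 : Int) ^ wl.length - 1) < 0) :
    (pvProd (wl.map (fun c => [PySem.Chars.lowerChar c, PySem.Chars.upperChar c]))).take (limit + 1).toNat
      = (List.range ((min limit ((2 : Int) ^ wl.length - 1)).toNat + 1)).map (pvDec wl) := by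
  have hlen := pvProd_length wl
  set P : Nat := 2 ^ wl.length with hP
  have hP1 : 1 ≤ P := Nat.one_le_two_pow
  have hcast : ((2 : Int) ^ wl.length) = (P : Int) := by rw [hP]; push_cast; ring
  rw [hcast] at hpos ⊢
  set K : Nat := (min limit ((P : Int) - 1)).toNat + 1 with hK
  have hKP : K ≤ P := by omega
  have hKmin : min (limit + 1).toNat P = K := by omega
  apply List.ext_getElem?
  intro j
  rw [List.getElem?_take, List.getElem?_map]
  by_cases hj : j < K
  · have hjP : j < P := lt_of_lt_of_le hj hKP
    have hjL : j < (limit + 1).toNat := by omega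
    rw [if_pos hjL, List.getElem?_range hj, pvProd_get wl j (by rw [← hP]; exact hjP)]
    rfl
  · have hrange : (List.range K)[j]? = none := List.getElem?_eq_none (by simpa using hj)
    rw [hrange]
    by_cases hjL : j < (limit + 1).toNat
    · rw [if_pos hjL]
      rw [List.getElem?_eq_none (by rw [hlen]; omega)]
      rfl
    · rw [if_neg hjL]
      rfl

theorem pvMain (word : String) (limit : Int) :
    random_case_variants word limit = random_case_variants_alt word limit := by
  unfold random_case_variants random_case_variants_alt
  rw [pvLoopA_eq]
  simp only [sub_zero]
  by_cases hneg : min limit ((2 : Int) ^ word.toList.length - 1) < 0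
  · have h0 : (limit + 1).toNat = 0 := by
      have : (0 : Int) ≤ 2 ^ word.toList.length - 1 := by
        have := pow_pos (by norm_num : (0 : Int) < 2) word.toList.length
        omega
      omega
    rw [if_pos hneg, h0]
    simp
  · rw [if_neg hneg, pvTake_eq word.toList limit hneg, List.map_map, List.foldl_map]
    rfl

theorem random_case_variants_spec : Claim_equal_random_case_variants := by
  intro word limit _
  unfold Spec_random_case_variants
  exact pvMain word limit
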